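-- pv_equiv track=rewrite | github.com/ersonasolidna/lamiblogswiatnauki | 2021_05_Zad1.py | obliczLiczbeNL
-- ===== SOURCE A (Python) =====
-- def obliczLiczbeNL(i,j,k,l,m=2,p=2):
--     wynik = 1
--     liczby = [i,j,k,l,m,p,2]
--     dowyrzucenia = []
--
--     for liczba in liczby:
--         if liczba > 10:
--             liczby.append(1)
--             liczby.append(liczba % 10)
--             dowyrzucenia.append(liczba)
--             #print ("cyfra druga",liczba % 10)
--
--     liczby = [x for x in liczby if x not in dowyrzucenia]
--     return len(set(liczby))
-- ===== SOURCE B (Python) =====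
-- def obliczLiczbeNL(i, j, k, l, m=2, p=2):
--     vals = []
--     for n in (i, j, k, l, m, p, 2):
--         if n > 10:
--             vals.extend((1, n % 10))
--         else:
--             vals.append(n)
--     vals.sort()
--     return 1 + sum(a != b for a, b in zip(vals, vals[1:]))
-- ===== Notes on version B (the rewrite author's own statement) =====
-- stated objective: alternative
-- what changed: Counts distinct values by sort-then-scan: collects each argument's contribution (1 and n%10 for n>10, else n) into a plain list, sorts it, and counts adjacent-unequal boundaries (+1), instead of A's mutate-during-iteration list, removal list and set() deduplication.
import Mathlib
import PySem

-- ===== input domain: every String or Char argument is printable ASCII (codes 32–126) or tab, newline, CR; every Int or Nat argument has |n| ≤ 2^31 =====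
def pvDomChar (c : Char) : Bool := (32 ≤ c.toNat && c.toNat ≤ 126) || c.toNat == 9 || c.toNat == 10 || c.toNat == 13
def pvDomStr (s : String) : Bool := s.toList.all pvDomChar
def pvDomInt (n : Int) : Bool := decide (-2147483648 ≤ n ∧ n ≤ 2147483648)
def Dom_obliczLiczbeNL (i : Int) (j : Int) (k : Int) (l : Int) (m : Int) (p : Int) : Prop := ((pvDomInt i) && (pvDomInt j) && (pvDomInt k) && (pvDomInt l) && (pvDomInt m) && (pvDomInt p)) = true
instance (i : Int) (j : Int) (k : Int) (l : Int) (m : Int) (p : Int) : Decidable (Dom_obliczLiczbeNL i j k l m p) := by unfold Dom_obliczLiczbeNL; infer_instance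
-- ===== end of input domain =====

-- B counts the distinct derived values by sort-then-scan (sort the contribution list, then
-- count adjacent-unequal boundaries) instead of A's mutate-during-iteration list, removal
-- list and set() deduplication (objective: alternative).

-- ===== PORT A =====
-- Python's 'for' over the list it mutates iterates by index over the growing list; this is
-- modelled exactly by the visited/pending split: 'pending' is the still-unvisited suffix of
-- 'liczby', and an append during iteration lands at its end.
def pvLoopA (seen : List Int) (pending : List Int) (dowy : List Int) : List Int × List Int :=
  match pending with
  | [] => (seen, dowy)
  | n :: rest =>
    if 10 < n then
      pvLoopA (seen ++ [n]) (rest ++ [1, PySem.Int.mod n 10]) (dowy ++ [n])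
    else
      pvLoopA (seen ++ [n]) rest dowy
termination_by pending.length + 2 * pending.countP (fun x => decide (10 < x))
decreasing_by
  · have hmod : PySem.Int.mod n 10 = n % 10 :=
      PySem.Int.mod_eq_emod_of_pos (by norm_num)
    rw [hmod]
    have h1 : ¬ (10:Int) < n % 10 := by omega
    simp_all [List.countP_append]
    omega
  · simp_all

def obliczLiczbeNL (i : Int) (j : Int) (k : Int) (l : Int) (m : Int) (p : Int) : Int :=
  let liczby := [i, j, k, l, m, p, 2]
  let r := pvLoopA [] liczby []
  let liczby2 := r.1.filter (fun x => !r.2.contains x)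
  ((PySem.Set.ofList liczby2).length : Int)

-- ===== PORT B =====
def obliczLiczbeNL_alt (i : Int) (j : Int) (k : Int) (l : Int) (m : Int) (p : Int) : Int :=
  let vals := [i, j, k, l, m, p, (2 : Int)].foldl
    (fun acc n =>
      if 10 < n then acc ++ [1, PySem.Int.mod n 10] else acc ++ [n]) []
  let s := PySem.List.sorted vals (fun x => x) false
  1 + (((s.zip s.tail).countP (fun ab => ab.1 != ab.2) : Nat) : Int)

-- ===== PRECONDITION & SPEC =====
def Spec_obliczLiczbeNL (i : Int) (j : Int) (k : Int) (l : Int) (m : Int) (p : Int) (out : Int) : Prop := out = obliczLiczbeNL_alt i j k l m p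
instance (i : Int) (j : Int) (k : Int) (l : Int) (m : Int) (p : Int) (out : Int) : Decidable (Spec_obliczLiczbeNL i j k l m p out) := by unfold Spec_obliczLiczbeNL; infer_instance

-- ===== CLAIM (what is proved, stated in full; the proofs are below) =====
def Claim_equal_obliczLiczbeNL : Prop := ∀ (i : Int) (j : Int) (k : Int) (l : Int) (m : Int) (p : Int), Dom_obliczLiczbeNL i j k l m p → Spec_obliczLiczbeNL i j k l m p (obliczLiczbeNL i j k l m p)

-- ===== LEMMAS AND PROOFS =====

-- PySem.Int.mod with the positive literal divisor 10 is Int.emod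
lemma pvMod10 (a : Int) : PySem.Int.mod a 10 = a % 10 :=
  PySem.Int.mod_eq_emod_of_pos (by norm_num)

-- what one visited element n contributes to the final set
def pvG (n : Int) : List Int := if 10 < n then [1, n % 10] else [n]

-- the elements A appends during iteration, in append order
def pvExtras (xs : List Int) : List Int :=
  xs.flatMap (fun n => if 10 < n then [1, n % 10] else [])

-- once every pending element is <= 10, the loop just moves pending onto seen
lemma pvLoopA_safe (safe : List Int) (seen dowy : List Int)
    (h : ∀ x ∈ safe, ¬ 10 < x) :
    pvLoopA seen safe dowy = (seen ++ safe, dowy) := by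
  induction safe generalizing seen with
  | nil => simp [pvLoopA]
  | cons n rest ih =>
    have hn : ¬ 10 < n := h n (List.mem_cons_self ..)
    rw [pvLoopA, if_neg hn, ih (seen ++ [n]) (fun x hx => h x (List.mem_cons_of_mem _ hx))]
    simp

-- full characterisation of the loop: pending = unvisited originals ++ already-appended safes
lemma pvLoopA_spec (pend : List Int) (safe seen dowy : List Int)
    (h : ∀ x ∈ safe, ¬ 10 < x) :
    pvLoopA seen (pend ++ safe) dowy =
      (seen ++ pend ++ safe ++ pvExtras pend,
       dowy ++ pend.filter (fun x => decide (10 < x))) := by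
  induction pend generalizing safe seen dowy with
  | nil => simp [pvLoopA_safe safe seen dowy h, pvExtras]
  | cons n rest ih =>
    by_cases hn : 10 < n
    · rw [List.cons_append, pvLoopA, if_pos hn, pvMod10]
      have hsafe' : ∀ x ∈ safe ++ [1, n % 10], ¬ 10 < x := by
        intro x hx
        rcases List.mem_append.1 hx with hx | hx
        · exact h x hx
        · simp at hx; omega
      rw [show rest ++ safe ++ [1, n % 10] = rest ++ (safe ++ [1, n % 10]) by simp,
        ih (safe ++ [1, n % 10]) (seen ++ [n]) (dowy ++ [n]) hsafe']
      simp [pvExtras, hn]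
    · rw [List.cons_append, pvLoopA, if_neg hn, ih safe (seen ++ [n]) dowy h]
      simp [pvExtras, hn]

-- A's deduplicated filtered list has exactly the membership of the per-element contributions
lemma pvA_mem (x : Int) (L : List Int) :
    x ∈ PySem.Set.ofList
        ((L ++ pvExtras L).filter
          (fun y => !(L.filter (fun z => decide (10 < z))).contains y)) ↔
      x ∈ L.flatMap pvG := by
  rw [PySem.Set.mem_ofList, List.mem_filter, List.mem_flatMap]
  simp only [List.contains_eq_mem, List.mem_filter, Bool.not_eq_eq_eq_not, Bool.not_true,
    decide_eq_false_iff_not, not_and, List.mem_append, decide_eq_true_eq]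
  constructor
  · rintro ⟨hL | hE, hguard⟩
    · exact ⟨x, hL, by simp [pvG, hguard hL]⟩
    · simp only [pvExtras, List.mem_flatMap] at hE
      obtain ⟨n, hn, hx⟩ := hE
      by_cases h10 : 10 < n
      · exact ⟨n, hn, by simpa [pvG, h10] using hx⟩
      · simp [h10] at hx
  · rintro ⟨n, hn, hc⟩
    by_cases h10 : 10 < n
    · simp only [pvG, if_pos h10] at hc
      simp only [List.mem_cons, List.not_mem_nil, or_false] at hc
      have hx10 : ¬ 10 < x := by rcases hc with rfl | rfl <;> omega
      refine ⟨Or.inr ?_, fun _ => hx10⟩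
      simp only [pvExtras, List.mem_flatMap]
      exact ⟨n, hn, by simp [h10]; tauto⟩
    · simp only [pvG, if_neg h10, List.mem_singleton] at hc
      subst hc
      exact ⟨Or.inl hn, fun _ => h10⟩

-- B's fold with appends is flatMap of the contribution function
lemma pvFoldB_eq_flatMap (xs : List Int) (acc : List Int) :
    xs.foldl
      (fun acc n => if 10 < n then acc ++ [1, n % 10] else acc ++ [n]) acc =
      acc ++ xs.flatMap pvG := by
  induction xs generalizing acc with
  | nil => simp
  | cons n rest ih =>
    by_cases hn : 10 < n <;>
      simp [ih, pvG, hn]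

-- sort-then-scan: on a ≤-sorted nonempty list, 1 + number of adjacent-unequal boundaries
-- equals the number of distinct elements (dedup length)
lemma pvAdjCount (a : Int) (t : List Int) (h : (a :: t).Pairwise (· ≤ ·)) :
    (List.dedup (a :: t)).length = 1 + ((a :: t).zip t).countP (fun ab => ab.1 != ab.2) := by
  induction t generalizing a with
  | nil => simp
  | cons b t' ih =>
    have hab : a ≤ b := (List.pairwise_cons.1 h).1 b (List.mem_cons_self ..)
    have ht : (b :: t').Pairwise (· ≤ ·) := (List.pairwise_cons.1 h).2
    by_cases hEq : a = b
    · subst hEq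
      have hmem : a ∈ a :: t' := List.mem_cons_self ..
      rw [List.dedup_cons_of_mem hmem]
      simp only [List.zip_cons_cons, List.countP_cons, ih a ht]
      simp
    · have hnot : a ∉ b :: t' := by
        intro hmem
        rcases List.mem_cons.1 hmem with rfl | hmem'
        · exact hEq rfl
        · have hb : ∀ y ∈ t', b ≤ y := (List.pairwise_cons.1 ht).1
          have := hb a hmem'
          omega
      rw [List.dedup_cons_of_notMem hnot]
      simp only [List.length_cons, List.zip_cons_cons, List.countP_cons, ih b ht]
      simp [hEq]
      omega

-- ===== VERDICT (by name: the statement is the Claim_ definition above) =====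
theorem obliczLiczbeNL_spec : Claim_equal_obliczLiczbeNL := by
  intro i j k l m p _
  unfold Spec_obliczLiczbeNL obliczLiczbeNL obliczLiczbeNL_alt
  set L : List Int := [i, j, k, l, m, p, 2] with hL
  have hloop := pvLoopA_spec L [] [] [] (by simp)
  simp only [List.append_nil, List.nil_append] at hloop
  simp only [hloop, pvMod10, pvFoldB_eq_flatMap L [], List.nil_append]
  set s : List Int := PySem.List.sorted (L.flatMap pvG) (fun x => x) false with hs
  -- s is nonempty: 2 ∈ L contributes
  have hmem2 : (2 : Int) ∈ L.flatMap pvG := by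
    refine List.mem_flatMap.2 ⟨2, by simp [hL], by simp [pvG]⟩
  have hsmem : ∀ x : Int, x ∈ s ↔ x ∈ L.flatMap pvG := by
    intro x; rw [hs]; simp [PySem.List.mem_sorted]
  obtain ⟨a, t, hst⟩ : ∃ a t, s = a :: t := by
    cases hcase : s with
    | nil => exact absurd ((hsmem 2).2 hmem2) (by simp [hcase])
    | cons a t => exact ⟨a, t, rfl⟩
  have hpair : s.Pairwise (· ≤ ·) := by
    rw [hs]
    exact PySem.List.sorted_pairwise _ _
  -- number of distinct values: A's nodup list and dedup s are perms
  have hperm : (PySem.Set.ofList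
        ((L ++ pvExtras L).filter
          (fun y => !(L.filter (fun z => decide (10 < z))).contains y))).Perm
      (List.dedup s) := by
    rw [List.perm_ext_iff_of_nodup (PySem.Set.nodup_ofList _) (List.nodup_dedup s)]
    intro x
    rw [pvA_mem x L, List.mem_dedup, hsmem x]
  have hlen := hperm.length_eq
  rw [hst] at hpair hlen ⊢
  rw [hlen, pvAdjCount a t hpair]
  push_cast
  simp
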